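-- pv_equiv track=rewrite | github.com/mrbean088/MediaInfo-Bot | bot.py | get_video_format
-- ===== SOURCE A (Python) =====
-- from typing import Optional
--
-- def get_video_format(codec: str, transfer: str = '', hdr: str = '', bit_depth: str = '') -> Optional[str]:
--     if not codec:
--         return None
--
--     codec = codec.lower()
--     format_info = []
--
--     if any(x in codec for x in ['hevc', 'h.265', 'h265']):
--         format_info.append('HEVC')
--     elif 'av1' in codec:
--         format_info.append('AV1')
--     elif any(x in codec for x in ['avc', 'avc1', 'h.264', 'h264']):
--         format_info.append('x264')
--     elif 'vp9' in codec:
--         format_info.append('VP9')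
--     elif any(x in codec for x in ['mpeg4', 'xvid']):
--         format_info.append('MPEG4')
--     else:
--         return None
--
--     try:
--         if bit_depth and int(bit_depth) > 8:
--             format_info.append(f"{bit_depth}bit")
--     except:
--         pass
--
--     transfer = transfer.lower()
--     hdr = hdr.lower()
--
--     if any(x in transfer for x in ['pq', 'hlg', 'smpte', '2084']) or 'hdr' in hdr:
--         format_info.append('HDR')
--
--     return ' '.join(format_info)
-- ===== SOURCE B (Python) =====
-- from typing import Optional
--
-- # pattern -> priority rank; label is looked up by the minimum rank among all matches
-- PATTERN_RANK = [
--     ('hevc', 0), ('h.265', 0), ('h265', 0),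
--     ('av1', 1),
--     ('avc', 2), ('h.264', 2), ('h264', 2),   # 'avc' subsumes A's 'avc1'
--     ('vp9', 3),
--     ('mpeg4', 4), ('xvid', 4),
-- ]
-- LABELS = ['HEVC', 'AV1', 'x264', 'VP9', 'MPEG4']
-- HDR_KEYS = ('pq', 'hlg', 'smpte', '2084')
--
-- def get_video_format(codec: str, transfer: str = '', hdr: str = '', bit_depth: str = '') -> Optional[str]:
--     c = codec.lower()
--     ranks = [r for p, r in PATTERN_RANK if p in c]
--     if not ranks:
--         return None
--     s = LABELS[min(ranks)]
--     try:
--         if bit_depth and int(bit_depth) > 8: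
--             s += ' ' + bit_depth + 'bit'
--     except ValueError:
--         pass
--     if any(k in transfer.lower() for k in HDR_KEYS) or 'hdr' in hdr.lower():
--         s += ' HDR'
--     return s
-- ===== Notes on version B (the rewrite author's own statement) =====
-- stated objective: alternative
-- what changed: Instead of a short-circuiting elif cascade, B collects the priority ranks of ALL matching patterns in one comprehension and selects the label by minimum rank, then builds the result by direct string concatenation instead of a list plus ' '.join.
import Mathlib
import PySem

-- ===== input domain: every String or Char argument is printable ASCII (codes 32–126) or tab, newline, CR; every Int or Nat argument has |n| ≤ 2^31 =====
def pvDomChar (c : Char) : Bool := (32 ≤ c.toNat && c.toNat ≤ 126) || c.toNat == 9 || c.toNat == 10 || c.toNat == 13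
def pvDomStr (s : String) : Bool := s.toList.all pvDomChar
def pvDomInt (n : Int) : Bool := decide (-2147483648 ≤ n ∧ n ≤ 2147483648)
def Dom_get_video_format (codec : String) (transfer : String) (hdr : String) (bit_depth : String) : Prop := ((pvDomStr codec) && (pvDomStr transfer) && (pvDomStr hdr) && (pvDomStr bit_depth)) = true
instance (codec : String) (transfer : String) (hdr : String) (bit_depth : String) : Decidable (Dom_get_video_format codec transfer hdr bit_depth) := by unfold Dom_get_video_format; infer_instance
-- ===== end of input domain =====

-- B replaces A's short-circuiting elif cascade by collecting the priority ranks of ALL matching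
-- patterns and selecting the label of minimum rank, and builds the result by direct string
-- concatenation instead of a list plus ' '.join; objective: alternative.

-- ===== PORT A =====
def get_video_format (codec : String) (transfer : String) (hdr : String) (bit_depth : String) : Option String :=
  if codec = "" then none
  else
    let c := PySem.Str.lower codec
    let fi? : Option (List String) :=
      if (["hevc", "h.265", "h265"].any fun x => PySem.Str.isIn x c) then some ["HEVC"]
      else if PySem.Str.isIn "av1" c then some ["AV1"]
      else if (["avc", "avc1", "h.264", "h264"].any fun x => PySem.Str.isIn x c) then some ["x264"]
      else if PySem.Str.isIn "vp9" c then some ["VP9"]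
      else if (["mpeg4", "xvid"].any fun x => PySem.Str.isIn x c) then some ["MPEG4"]
      else none
    match fi? with
    | none => none
    | some fi0 =>
      -- try: if bit_depth and int(bit_depth) > 8 … except: pass  (int() raises exactly where ofStr? is none)
      let fi1 := if bit_depth ≠ "" then
          match PySem.Int.ofStr? bit_depth with
          | some n => if 8 < n then fi0 ++ [bit_depth ++ "bit"] else fi0
          | none => fi0
        else fi0
      let t := PySem.Str.lower transfer
      let h := PySem.Str.lower hdr
      let fi2 := if (["pq", "hlg", "smpte", "2084"].any fun x => PySem.Str.isIn x t) || PySem.Str.isIn "hdr" h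
        then fi1 ++ ["HDR"] else fi1
      some (PySem.Str.join " " fi2)

-- ===== PORT B =====
-- pattern -> priority rank; the label is looked up by the minimum rank among all matches
def pvPatternRank : List (String × Int) :=
  [("hevc", 0), ("h.265", 0), ("h265", 0),
   ("av1", 1),
   ("avc", 2), ("h.264", 2), ("h264", 2),
   ("vp9", 3),
   ("mpeg4", 4), ("xvid", 4)]

def pvLabels : List String := ["HEVC", "AV1", "x264", "VP9", "MPEG4"]

def pvHdrKeys : List String := ["pq", "hlg", "smpte", "2084"]

def get_video_format_alt (codec : String) (transfer : String) (hdr : String) (bit_depth : String) : Option String :=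
  let c := PySem.Str.lower codec
  -- ranks = [r for p, r in PATTERN_RANK if p in c]
  let ranks := pvPatternRank.filterMap (fun pr => if PySem.Str.isIn pr.1 c then some pr.2 else none)
  if ranks = [] then none
  else
    match PySem.List.min? ranks (fun x => x) with    -- min(ranks); ranks ≠ [] here, so never none
    | none => none
    | some m =>
      match PySem.List.pyGet? pvLabels m with        -- LABELS[…]; m ∈ [0,4], so never none
      | none => none
      | some lab =>
        -- try: if bit_depth and int(bit_depth) > 8: s += ' ' + bit_depth + 'bit' … except ValueError: pass
        let s1 := if bit_depth ≠ "" then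
            match PySem.Int.ofStr? bit_depth with
            | some n => if 8 < n then lab ++ " " ++ bit_depth ++ "bit" else lab
            | none => lab
          else lab
        let s2 := if (pvHdrKeys.any fun k => PySem.Str.isIn k (PySem.Str.lower transfer)) || PySem.Str.isIn "hdr" (PySem.Str.lower hdr)
          then s1 ++ " HDR" else s1
        some s2

-- ===== PRECONDITION & SPEC =====
def Spec_get_video_format (codec : String) (transfer : String) (hdr : String) (bit_depth : String) (out : Option String) : Prop := out = get_video_format_alt codec transfer hdr bit_depth
instance (codec : String) (transfer : String) (hdr : String) (bit_depth : String) (out : Option String) : Decidable (Spec_get_video_format codec transfer hdr bit_depth out) := by unfold Spec_get_video_format; infer_instance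

-- ===== CLAIM (what is proved, stated in full; the proofs are below) =====
def Claim_equal_get_video_format : Prop := ∀ (codec : String) (transfer : String) (hdr : String) (bit_depth : String), Dom_get_video_format codec transfer hdr bit_depth → Spec_get_video_format codec transfer hdr bit_depth (get_video_format codec transfer hdr bit_depth)

-- ===== LEMMAS AND PROOFS =====

-- B's label selection (filter ranks, take min, index) as one function, for stating lemmas
def pvSel (ranks : List Int) : Option String :=
  if ranks = [] then none
  else
    match PySem.List.min? ranks (fun x => x) with
    | none => none
    | some m => PySem.List.pyGet? pvLabels m

-- B's suffix building (bit depth, HDR) as one function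
def pvTail (lab transfer hdr bit_depth : String) : String :=
  let s1 := if bit_depth ≠ "" then
      match PySem.Int.ofStr? bit_depth with
      | some n => if 8 < n then lab ++ " " ++ bit_depth ++ "bit" else lab
      | none => lab
    else lab
  if (pvHdrKeys.any fun k => PySem.Str.isIn k (PySem.Str.lower transfer)) || PySem.Str.isIn "hdr" (PySem.Str.lower hdr)
    then s1 ++ " HDR" else s1

lemma alt_eq (codec transfer hdr bit_depth : String) :
    get_video_format_alt codec transfer hdr bit_depth =
      Option.map (fun lab => pvTail lab transfer hdr bit_depth)
        (pvSel (pvPatternRank.filterMap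
          (fun pr => if PySem.Str.isIn pr.1 (PySem.Str.lower codec) then some pr.2 else none))) := by
  simp only [get_video_format_alt, pvSel, pvTail]
  by_cases hL : (pvPatternRank.filterMap
      (fun pr => if PySem.Str.isIn pr.1 (PySem.Str.lower codec) then some pr.2 else none)) = []
  · rw [if_pos hL, if_pos hL]
    rfl
  · rw [if_neg hL, if_neg hL]
    cases PySem.List.min? (pvPatternRank.filterMap
        (fun pr => if PySem.Str.isIn pr.1 (PySem.Str.lower codec) then some pr.2 else none)) (fun x => x) with
    | none => rfl
    | some m =>
      dsimp only
      cases PySem.List.pyGet? pvLabels m with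
      | none => rfl
      | some lab => rfl

-- min-rank selection over all matches equals the first-match cascade, for every match pattern
lemma pvGen (b1 b2 b3 b4 b5 b6 b7 b8 b9 b10 : Bool) :
    pvSel (List.filterMap (fun pr : Bool × Int => if pr.1 then some pr.2 else none)
      [(b1,0),(b2,0),(b3,0),(b4,1),(b5,2),(b6,2),(b7,2),(b8,3),(b9,4),(b10,4)])
  = (if b1 || b2 || b3 then some "HEVC" else if b4 then some "AV1"
     else if b5 || b6 || b7 then some "x264" else if b8 then some "VP9"
     else if b9 || b10 then some "MPEG4" else none) := by
  revert b1 b2 b3 b4 b5 b6 b7 b8 b9 b10; decide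

-- any string containing 'avc1' contains 'avc', so A's 4-pattern test equals B's 3-pattern one
lemma avc1_imp_avc (c : String) (h : PySem.Str.isIn "avc1" c = true) : PySem.Str.isIn "avc" c = true := by
  rw [PySem.Str.isIn_iff_infix] at h ⊢
  exact List.IsInfix.trans (by decide) h

lemma avc_eq (c : String) :
    (PySem.Str.isIn "avc" c || (PySem.Str.isIn "avc1" c || (PySem.Str.isIn "h.264" c || PySem.Str.isIn "h264" c)))
      = (PySem.Str.isIn "avc" c || (PySem.Str.isIn "h.264" c || PySem.Str.isIn "h264" c)) := by
  cases ha : PySem.Str.isIn "avc" c with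
  | true => rfl
  | false =>
    cases h1 : PySem.Str.isIn "avc1" c with
    | false => rfl
    | true => exact absurd (ha.symm.trans (avc1_imp_avc c h1)) (by decide)

-- B's label pipeline equals A's elif cascade (as singleton lists) on every lowered codec string c
lemma cascade_list_eq (c : String) :
    (if (["hevc", "h.265", "h265"].any fun x => PySem.Str.isIn x c) then some ["HEVC"]
     else if PySem.Str.isIn "av1" c then some ["AV1"]
     else if (["avc", "avc1", "h.264", "h264"].any fun x => PySem.Str.isIn x c) then some ["x264"]
     else if PySem.Str.isIn "vp9" c then some ["VP9"]
     else if (["mpeg4", "xvid"].any fun x => PySem.Str.isIn x c) then some ["MPEG4"]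
     else none)
  = Option.map (fun lab => [lab])
      (pvSel (pvPatternRank.filterMap (fun pr => if PySem.Str.isIn pr.1 c then some pr.2 else none))) := by
  have h := pvGen (PySem.Str.isIn "hevc" c) (PySem.Str.isIn "h.265" c) (PySem.Str.isIn "h265" c)
    (PySem.Str.isIn "av1" c) (PySem.Str.isIn "avc" c) (PySem.Str.isIn "h.264" c) (PySem.Str.isIn "h264" c)
    (PySem.Str.isIn "vp9" c) (PySem.Str.isIn "mpeg4" c) (PySem.Str.isIn "xvid" c)
  simp only [pvPatternRank, List.filterMap] at h ⊢
  simp only [Bool.or_assoc] at h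
  simp only [List.any_cons, List.any_nil, Bool.or_false]
  rw [avc_eq c, h]
  split_ifs <;> rfl

-- no nonempty pattern occurs in the empty string, so B also returns none for an empty codec
lemma sel_empty : pvSel (pvPatternRank.filterMap
    (fun pr => if PySem.Str.isIn pr.1 (PySem.Str.lower "") then some pr.2 else none)) = none := by decide

-- ' '.join on the small lists A builds equals B's direct concatenation
lemma join_one (a : String) : PySem.Str.join " " [a] = a := by
  apply String.toList_inj.mp
  simp [PySem.Str.join, PySem.Chars.join_singleton]

lemma join_two (a b : String) : PySem.Str.join " " [a, b] = a ++ " " ++ b := by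
  apply String.toList_inj.mp
  simp [PySem.Str.join, PySem.Chars.join_cons_cons, PySem.Chars.join_singleton]

lemma join_hdr (a : String) : PySem.Str.join " " [a, "HDR"] = a ++ " HDR" := by
  apply String.toList_inj.mp
  simp [PySem.Str.join, PySem.Chars.join_cons_cons, PySem.Chars.join_singleton]

lemma join_two_hdr (a b : String) : PySem.Str.join " " [a, b, "HDR"] = a ++ " " ++ b ++ " HDR" := by
  apply String.toList_inj.mp
  simp [PySem.Str.join, PySem.Chars.join_cons_cons, PySem.Chars.join_singleton]

lemma sp_hdr : (" " : String) ++ "HDR" = " HDR" := by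
  apply String.toList_inj.mp
  simp

-- ===== VERDICT (by name: the statement is the Claim_ definition above) =====
theorem get_video_format_spec : Claim_equal_get_video_format := by
  intro codec transfer hdr bit_depth _
  unfold Spec_get_video_format
  simp only [get_video_format]
  rw [alt_eq]
  by_cases hc : codec = ""
  · subst hc
    rw [if_pos rfl, sel_empty]
    rfl
  · rw [if_neg hc, cascade_list_eq (PySem.Str.lower codec)]
    cases pvSel (pvPatternRank.filterMap
        (fun pr => if PySem.Str.isIn pr.1 (PySem.Str.lower codec) then some pr.2 else none)) with
    | none => rfl
    | some lab =>
      simp only [Option.map, pvTail, pvHdrKeys]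
      cases PySem.Int.ofStr? bit_depth with
      | none => split_ifs <;> simp [join_one, join_hdr]
      | some n =>
        split_ifs <;> simp [join_one, join_two, sp_hdr, String.append_assoc] <;>
          try (split_ifs <;> simp [join_one, join_two, join_two_hdr, sp_hdr, String.append_assoc])
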